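-- pv_equiv track=rewrite | github.com/EvryRNA/my_RNAAssessment | src/Preprocessing.py | get_Ag_mean_struct
-- ===== SOURCE A (Python) =====
-- def get_Ag_mean_struct(dico_pair, interv, angle_sup):
--     if angle_sup == "OMEGA":
--         intv1 = int(interv/3)
--         intv2 = int(interv/3*2)
--         intv3 = interv
--     elif angle_sup == "THETA'":
--         intv1 = int(interv/4)
--         intv2 = int(interv/4*2)
--         intv3 = int(interv/4*3)
--         intv4 = interv
--     else:
--         intv1 = int(interv/2)
--         intv2 = interv
--
--     mean1 = []
--     len_dico = len(dico_pair.keys())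
--     for i in range(0, intv1, 1):
--         pos = 0
--         for key in dico_pair:
--             pos += dico_pair[key][i]
--         mean1.append(round(pos/len_dico))
--
--     mean2 = []
--     for j in range(intv1, intv2, 1):
--         pos = 0
--         for key in dico_pair:
--             pos += dico_pair[key][j]
--         mean2.append(round(pos/len_dico))
--
--     if angle_sup == "OMEGA" or angle_sup == "THETA'":
--         mean3 = []
--         for k in range(intv2, intv3, 1):
--             pos = 0
--             for key in dico_pair:
--                 pos += dico_pair[key][k]
--             mean3.append(round(pos/len_dico))
--
--     if angle_sup == "THETA'":
--         mean4 = []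
--         for l in range(intv3, intv4, 1):
--             pos = 0
--             for key in dico_pair:
--                 pos += dico_pair[key][l]
--             mean4.append(round(pos/len_dico))
--
--     if angle_sup == "OMEGA":
--         mean_struct = [mean1 + mean2 + mean3]*len_dico
--     elif angle_sup == "THETA'":
--         mean_struct = [mean1 + mean2 + mean3 + mean4]*len_dico
--     else:
--         mean_struct = [mean1 + mean2]*len_dico
--     return mean_struct
-- ===== SOURCE B (Python) =====
-- def get_Ag_mean_struct(dico_pair, interv, angle_sup):
--     len_dico = len(dico_pair)
--     totals = [0] * interv
--     for row in dico_pair.values():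
--         totals = [t + row[i] for i, t in enumerate(totals)]
--     means = [round(t / len_dico) for t in totals]
--     return [means] * len_dico
-- ===== Notes on version B (the rewrite author's own statement) =====
-- stated objective: simpler
-- what changed: A partitions [0, interv) into 2-4 angle_sup-dependent segments and, column-outer/key-inner, recomputes a key scan per column; B drops the segment bookkeeping entirely and makes one key-outer pass that maintains a running totals array (columns inner), then rounds once and replicates.
import Mathlib
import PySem

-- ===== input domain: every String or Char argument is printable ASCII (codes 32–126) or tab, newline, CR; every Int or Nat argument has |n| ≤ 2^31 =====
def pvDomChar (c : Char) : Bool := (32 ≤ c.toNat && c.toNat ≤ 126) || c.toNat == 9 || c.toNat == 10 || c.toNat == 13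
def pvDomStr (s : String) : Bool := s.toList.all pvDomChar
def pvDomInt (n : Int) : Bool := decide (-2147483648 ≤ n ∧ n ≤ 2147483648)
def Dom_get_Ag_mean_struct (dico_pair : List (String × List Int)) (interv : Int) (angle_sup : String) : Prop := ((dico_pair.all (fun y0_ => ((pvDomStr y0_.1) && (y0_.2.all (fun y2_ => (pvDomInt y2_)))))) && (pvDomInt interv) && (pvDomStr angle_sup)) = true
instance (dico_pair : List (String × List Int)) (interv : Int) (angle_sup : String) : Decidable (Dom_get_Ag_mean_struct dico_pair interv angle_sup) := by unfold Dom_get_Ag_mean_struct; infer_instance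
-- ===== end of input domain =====

-- B replaces A's angle-dependent segment bookkeeping (column-outer/key-inner scans per segment) by one
-- key-outer pass maintaining a running totals array; same return value (objective: simpler).

-- round(p / n) for ints p, n (Python rounds the float p/n half-to-even): exact rational round-half-even.
-- Exact w.r.t. CPython for the magnitudes Dom admits (|p/n| ≤ 2^31+1, p, n exact in double).
-- Shared by both ports (both Pythons contain the same expression round(·/len_dico)).
-- n = 0 (Python's ZeroDivisionError) is excluded by Pre_.
def pyRoundDiv (p n : Int) : Int :=
  if 2 * PySem.Int.mod p n < n then PySem.Int.floordiv p n
  else if n < 2 * PySem.Int.mod p n then PySem.Int.floordiv p n + 1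
  else if PySem.Int.mod (PySem.Int.floordiv p n) 2 = 0 then PySem.Int.floordiv p n
  else PySem.Int.floordiv p n + 1

-- ===== PORT A =====
-- 'pos = 0; for key in dico_pair: pos += dico_pair[key][i]' — d[key] always hits (key is iterated
-- from d itself); the index default 0 is never used under Pre_ (IndexError excluded there).
def pyColSum (d : PySem.Dict String (List Int)) (i : Int) : Int :=
  d.keys.foldl (fun pos key => pos + PySem.List.pyGetD (d.getD key []) i 0) 0

-- int(interv/3), int(interv/3*2), int(interv/4*3), … are ported as truncating divisions
-- truncdiv interv 3, truncdiv (interv*2) 3, truncdiv (interv*3) 4, …: exact for |interv| ≤ 2^31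
-- (the float error of interv/3 is far below the 1/3 distance to the truncation boundary).
def get_Ag_mean_struct (dico_pair : List (String × List Int)) (interv : Int) (angle_sup : String) : List (List Int) :=
  let d := PySem.Dict.ofList dico_pair
  let len_dico : Int := d.size
  if angle_sup = "OMEGA" then
    let intv1 := PySem.Int.truncdiv interv 3
    let intv2 := PySem.Int.truncdiv (interv * 2) 3
    let intv3 := interv
    let mean1 := (PySem.List.pyRange 0 intv1 1).map (fun i => pyRoundDiv (pyColSum d i) len_dico)
    let mean2 := (PySem.List.pyRange intv1 intv2 1).map (fun j => pyRoundDiv (pyColSum d j) len_dico)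
    let mean3 := (PySem.List.pyRange intv2 intv3 1).map (fun k => pyRoundDiv (pyColSum d k) len_dico)
    List.replicate len_dico.toNat (mean1 ++ mean2 ++ mean3)
  else if angle_sup = "THETA'" then
    let intv1 := PySem.Int.truncdiv interv 4
    let intv2 := PySem.Int.truncdiv (interv * 2) 4
    let intv3 := PySem.Int.truncdiv (interv * 3) 4
    let intv4 := interv
    let mean1 := (PySem.List.pyRange 0 intv1 1).map (fun i => pyRoundDiv (pyColSum d i) len_dico)
    let mean2 := (PySem.List.pyRange intv1 intv2 1).map (fun j => pyRoundDiv (pyColSum d j) len_dico)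
    let mean3 := (PySem.List.pyRange intv2 intv3 1).map (fun k => pyRoundDiv (pyColSum d k) len_dico)
    let mean4 := (PySem.List.pyRange intv3 intv4 1).map (fun l => pyRoundDiv (pyColSum d l) len_dico)
    List.replicate len_dico.toNat (mean1 ++ mean2 ++ mean3 ++ mean4)
  else
    let intv1 := PySem.Int.truncdiv interv 2
    let intv2 := interv
    let mean1 := (PySem.List.pyRange 0 intv1 1).map (fun i => pyRoundDiv (pyColSum d i) len_dico)
    let mean2 := (PySem.List.pyRange intv1 intv2 1).map (fun j => pyRoundDiv (pyColSum d j) len_dico)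
    List.replicate len_dico.toNat (mean1 ++ mean2)

-- ===== PORT B =====
-- totals = [0]*interv; for row in d.values(): totals = [t + row[i] for i, t in enumerate(totals)];
-- means = [round(t/len_dico) for t in totals]; return [means]*len_dico
def get_Ag_mean_struct_alt (dico_pair : List (String × List Int)) (interv : Int) (angle_sup : String) : List (List Int) :=
  let d := PySem.Dict.ofList dico_pair
  let len_dico : Int := d.size
  let totals := d.values.foldl
    (fun totals row => (PySem.List.enumerate totals 0).map (fun it => it.2 + PySem.List.pyGetD row it.1 0))
    (List.replicate interv.toNat 0)
  let means := totals.map (fun t => pyRoundDiv t len_dico)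
  List.replicate len_dico.toNat means

-- ===== PRECONDITION & SPEC =====
-- Exactly where the Python A returns: for interv > 0 it divides by len(dico) and reads every
-- index 0..interv-1 of every (deduplicated-dict) row, so the dict must be nonempty and each of its
-- rows at least interv long (ZeroDivisionError / IndexError otherwise); for interv ≤ 0 it is total.
def Pre_get_Ag_mean_struct (dico_pair : List (String × List Int)) (interv : Int) (angle_sup : String) : Prop :=
  0 < interv → (dico_pair ≠ [] ∧ ∀ p ∈ (PySem.Dict.ofList dico_pair).items, interv ≤ (p.2.length : Int))
instance (dico_pair : List (String × List Int)) (interv : Int) (angle_sup : String) : Decidable (Pre_get_Ag_mean_struct dico_pair interv angle_sup) := by unfold Pre_get_Ag_mean_struct; infer_instance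

def pvWitness_get_Ag_mean_struct : (List (String × List Int)) × Int × String :=
  ([("a", [1, 2, 3]), ("b", [4, 5, 9])], 3, "OMEGA")

def Spec_get_Ag_mean_struct (dico_pair : List (String × List Int)) (interv : Int) (angle_sup : String) (out : List (List Int)) : Prop := out = get_Ag_mean_struct_alt dico_pair interv angle_sup
instance (dico_pair : List (String × List Int)) (interv : Int) (angle_sup : String) (out : List (List Int)) : Decidable (Spec_get_Ag_mean_struct dico_pair interv angle_sup out) := by unfold Spec_get_Ag_mean_struct; infer_instance

-- ===== CLAIM (what is proved, stated in full; the proofs are below) =====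
def Claim_equal_get_Ag_mean_struct : Prop := ∀ (dico_pair : List (String × List Int)) (interv : Int) (angle_sup : String), Dom_get_Ag_mean_struct dico_pair interv angle_sup → Pre_get_Ag_mean_struct dico_pair interv angle_sup → Spec_get_Ag_mean_struct dico_pair interv angle_sup (get_Ag_mean_struct dico_pair interv angle_sup)

-- ===== LEMMAS AND PROOFS =====

-- the per-column sum over a fixed list of rows
def colSum (rows : List (List Int)) (i : Int) : Int :=
  (rows.map (fun row => PySem.List.pyGetD row i 0)).sum

theorem colSum_nil (i : Int) : colSum [] i = 0 := rfl

theorem colSum_cons (row : List Int) (rows : List (List Int)) (i : Int) :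
    colSum (row :: rows) i = PySem.List.pyGetD row i 0 + colSum rows i := by
  simp [colSum]

-- A's inner key loop is the column sum over the dict's values
theorem pyColSum_eq_colSum (d : PySem.Dict String (List Int)) (hnd : d.keys.Nodup) (i : Int) :
    pyColSum d i = colSum d.values i := by
  unfold pyColSum colSum
  rw [PySem.List.foldl_add, PySem.Dict.values_eq_map_keys d hnd ([] : List Int), List.map_map]
  simp [Function.comp_def]

-- B's row loop maintains totals[j] = init[j] + colSum of the rows folded so far
theorem foldl_rows_eq (rows : List (List Int)) (init : List Int) :
    rows.foldl
      (fun totals row => (PySem.List.enumerate totals 0).map (fun it => it.2 + PySem.List.pyGetD row it.1 0))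
      init
    = (PySem.List.pyRange 0 (PySem.List.len init) 1).map
        (fun j => PySem.List.pyGetD init j 0 + colSum rows j) := by
  induction rows generalizing init with
  | nil =>
      simp only [List.foldl_nil, colSum_nil, add_zero]
      exact (PySem.List.map_pyGetD_pyRange_zero init 0).symm
  | cons row rows ih =>
      rw [List.foldl_cons, ih]
      have hstep : (PySem.List.enumerate init).map (fun it => it.2 + PySem.List.pyGetD row it.1 0)
          = (PySem.List.pyRange 0 (PySem.List.len init) 1).map
              (fun j => PySem.List.pyGetD init j 0 + PySem.List.pyGetD row j 0) := by
        rw [PySem.List.enumerate_eq_map_pyRange init (0 : Int), List.map_map]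
        rfl
      rw [hstep]
      have hlen : PySem.List.len
          ((PySem.List.pyRange 0 (PySem.List.len init) 1).map
            (fun j => PySem.List.pyGetD init j 0 + PySem.List.pyGetD row j 0))
          = PySem.List.len init := by
        simp [PySem.List.len_eq, PySem.List.length_pyRange_one]
      rw [hlen]
      apply List.map_congr_left
      intro j hj
      rw [PySem.List.mem_pyRange_one] at hj
      rw [PySem.List.pyGetD_map_pyRange_of_nonneg _ _ _ _ hj.1 hj.2]
      simp only [colSum_cons]
      ring

-- pyRange with an Int upper bound equals pyRange with its toNat
theorem pyRange_toNat (b : Int) :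
    PySem.List.pyRange 0 b 1 = PySem.List.pyRange 0 ((b.toNat : Int)) 1 := by
  rw [PySem.List.pyRange_one, PySem.List.pyRange_one]
  have h : (((b.toNat : Int)) - 0).toNat = (b - 0).toNat := by omega
  rw [h]

-- B's result, characterised
theorem alt_eq (dico_pair : List (String × List Int)) (interv : Int) (angle_sup : String) :
    get_Ag_mean_struct_alt dico_pair interv angle_sup
    = List.replicate ((PySem.Dict.ofList dico_pair).size : Int).toNat
        ((PySem.List.pyRange 0 interv 1).map
          (fun j => pyRoundDiv (colSum (PySem.Dict.ofList dico_pair).values j)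
                      ((PySem.Dict.ofList dico_pair).size : Int))) := by
  simp only [get_Ag_mean_struct_alt]
  rw [foldl_rows_eq, List.map_map]
  congr 1
  rw [pyRange_toNat interv]
  have hlen : PySem.List.len (List.replicate interv.toNat (0 : Int)) = ((interv.toNat : Nat) : Int) := by
    simp [PySem.List.len_eq]
  rw [hlen]
  apply List.map_congr_left
  intro j hj
  rw [PySem.List.mem_pyRange_one] at hj
  have : PySem.List.pyGetD (List.replicate interv.toNat (0 : Int)) j 0 = 0 := by
    rw [PySem.List.pyGetD_of_nonneg _ _ hj.1]
    simp [List.getD]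
  simp [this]

-- monotone truncating-division facts used to stitch A's segments together
theorem tdiv_bounds_pos (i : Int) (hi : 0 < i) :
    0 ≤ i.tdiv 3 ∧ i.tdiv 3 ≤ (i * 2).tdiv 3 ∧ (i * 2).tdiv 3 ≤ i ∧
    0 ≤ i.tdiv 4 ∧ i.tdiv 4 ≤ (i * 2).tdiv 4 ∧ (i * 2).tdiv 4 ≤ (i * 3).tdiv 4 ∧ (i * 3).tdiv 4 ≤ i ∧
    0 ≤ i.tdiv 2 ∧ i.tdiv 2 ≤ i := by
  have h1 := Int.tdiv_eq_ediv_of_nonneg (a := i) (b := 3) (le_of_lt hi)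
  have h2 := Int.tdiv_eq_ediv_of_nonneg (a := i * 2) (b := 3) (by nlinarith)
  have h3 := Int.tdiv_eq_ediv_of_nonneg (a := i) (b := 4) (le_of_lt hi)
  have h4 := Int.tdiv_eq_ediv_of_nonneg (a := i * 2) (b := 4) (by nlinarith)
  have h5 := Int.tdiv_eq_ediv_of_nonneg (a := i * 3) (b := 4) (by nlinarith)
  have h6 := Int.tdiv_eq_ediv_of_nonneg (a := i) (b := 2) (le_of_lt hi)
  rw [h1, h2, h3, h4, h5, h6]
  omega

theorem tdiv_nonpos_facts (i : Int) (hi : i ≤ 0) :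
    i.tdiv 3 ≤ 0 ∧ (i * 2).tdiv 3 ≤ i.tdiv 3 ∧ i ≤ (i * 2).tdiv 3 ∧
    i.tdiv 4 ≤ 0 ∧ (i * 2).tdiv 4 ≤ i.tdiv 4 ∧ (i * 3).tdiv 4 ≤ (i * 2).tdiv 4 ∧ i ≤ (i * 3).tdiv 4 ∧
    i.tdiv 2 ≤ 0 ∧ i ≤ i.tdiv 2 := by
  have e1 : i.tdiv 3 = -((-i).tdiv 3) := by rw [← Int.neg_tdiv]; ring_nf
  have e2 : (i * 2).tdiv 3 = -((-i * 2).tdiv 3) := by rw [← Int.neg_tdiv]; ring_nf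
  have e3 : i.tdiv 4 = -((-i).tdiv 4) := by rw [← Int.neg_tdiv]; ring_nf
  have e4 : (i * 2).tdiv 4 = -((-i * 2).tdiv 4) := by rw [← Int.neg_tdiv]; ring_nf
  have e5 : (i * 3).tdiv 4 = -((-i * 3).tdiv 4) := by rw [← Int.neg_tdiv]; ring_nf
  have e6 : i.tdiv 2 = -((-i).tdiv 2) := by rw [← Int.neg_tdiv]; ring_nf
  rw [e1, e2, e3, e4, e5, e6,
    Int.tdiv_eq_ediv_of_nonneg (by omega), Int.tdiv_eq_ediv_of_nonneg (by nlinarith),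
    Int.tdiv_eq_ediv_of_nonneg (by omega), Int.tdiv_eq_ediv_of_nonneg (by nlinarith),
    Int.tdiv_eq_ediv_of_nonneg (by nlinarith), Int.tdiv_eq_ediv_of_nonneg (by omega)]
  omega


theorem pyRange_split2 (m b : Int) (h1 : 0 ≤ m) (h2 : m ≤ b) (f : Int → Int) :
    (PySem.List.pyRange 0 m 1).map f ++ (PySem.List.pyRange m b 1).map f
    = (PySem.List.pyRange 0 b 1).map f := by
  rw [← List.map_append, ← PySem.List.pyRange_one_append 0 m b h1 h2]

-- ===== VERDICT (by name; the statement is Claim_equal_get_Ag_mean_struct above) =====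

theorem get_Ag_mean_struct_spec : Claim_equal_get_Ag_mean_struct := by
  intro dico_pair interv angle_sup _ _
  unfold Spec_get_Ag_mean_struct
  rw [alt_eq]
  simp only [get_Ag_mean_struct]
  have hnd : (PySem.Dict.ofList dico_pair).keys.Nodup := PySem.Dict.nodup_keys_ofList dico_pair
  have hcs : ∀ i : Int, pyColSum (PySem.Dict.ofList dico_pair) i
      = colSum (PySem.Dict.ofList dico_pair).values i := fun i => pyColSum_eq_colSum _ hnd i
  simp only [hcs]
  set d := PySem.Dict.ofList dico_pair
  set N : Int := (d.size : Int)
  set f : Int → Int := fun j => pyRoundDiv (colSum d.values j) N with hf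
  rcases (by omega : interv ≤ 0 ∨ 0 < interv) with hle | hpos
  · -- all ranges are empty
    obtain ⟨a1, a2, a3, a4, a5, a6, a7, a8, a9⟩ := tdiv_nonpos_facts interv hle
    split_ifs <;>
      simp [PySem.List.pyRange_one_eq_nil, PySem.Int.truncdiv, *]
  · obtain ⟨b1, b2, b3, b4, b5, b6, b7, b8, b9⟩ := tdiv_bounds_pos interv hpos
    split_ifs with hO hT
    · show List.replicate N.toNat _ = _
      congr 1
      show (PySem.List.pyRange 0 (PySem.Int.truncdiv interv 3) 1).map f
          ++ (PySem.List.pyRange (PySem.Int.truncdiv interv 3) (PySem.Int.truncdiv (interv*2) 3) 1).map f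
          ++ (PySem.List.pyRange (PySem.Int.truncdiv (interv*2) 3) interv 1).map f
          = (PySem.List.pyRange 0 interv 1).map f
      show (PySem.List.pyRange 0 (interv.tdiv 3) 1).map f
          ++ (PySem.List.pyRange (interv.tdiv 3) ((interv*2).tdiv 3) 1).map f
          ++ (PySem.List.pyRange ((interv*2).tdiv 3) interv 1).map f
          = (PySem.List.pyRange 0 interv 1).map f
      rw [pyRange_split2 _ _ b1 b2, pyRange_split2 _ _ (by omega) b3]
    · show List.replicate N.toNat _ = _
      congr 1
      show (PySem.List.pyRange 0 (interv.tdiv 4) 1).map f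
          ++ (PySem.List.pyRange (interv.tdiv 4) ((interv*2).tdiv 4) 1).map f
          ++ (PySem.List.pyRange ((interv*2).tdiv 4) ((interv*3).tdiv 4) 1).map f
          ++ (PySem.List.pyRange ((interv*3).tdiv 4) interv 1).map f
          = (PySem.List.pyRange 0 interv 1).map f
      rw [pyRange_split2 _ _ b4 b5, pyRange_split2 _ _ (by omega) b6,
        pyRange_split2 _ _ (by omega) b7]
    · show List.replicate N.toNat _ = _
      congr 1
      show (PySem.List.pyRange 0 (interv.tdiv 2) 1).map f
          ++ (PySem.List.pyRange (interv.tdiv 2) interv 1).map f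
          = (PySem.List.pyRange 0 interv 1).map f
      rw [pyRange_split2 _ _ b8 b9]
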